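-- pv_equiv track=rewrite | github.com/soheesgit/LiDAR-project | src/final_event_scorevote.py | _max_congestion_run
-- ===== SOURCE A (Python) =====
-- from typing import Dict, List, Optional, Any
--
-- def _max_congestion_run(window_logs: List[Dict[str, object]]) -> int:
--     best = 0
--     cur = 0
--
--     for row in window_logs:
--         if str(row.get("event_type", "")).strip() == "Congestion":
--             cur += 1
--             best = max(best, cur)
--         else:
--             cur = 0
--
--     return best
-- ===== SOURCE B (Python) =====
-- from typing import Dict, List, Optional, Any
--
-- def _max_congestion_run(window_logs: List[Dict[str, object]]) -> int:
--     flags = [str(row.get("event_type", "")).strip() == "Congestion" for row in window_logs]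
--     runs = []
--     rest = flags
--     while rest:
--         if rest[0]:
--             k = 0
--             while k < len(rest) and rest[k]:
--                 k += 1
--             runs.append(k)
--             rest = rest[k:]
--         else:
--             rest = rest[1:]
--     return max(runs, default=0)
-- ===== Notes on version B (the rewrite author's own statement) =====
-- stated objective: alternative
-- what changed: Instead of A's incremental counter with reset and a running best, B maps the rows to a boolean flag list, explicitly forms the maximal consecutive runs of True flags and returns the maximum run length (0 if none).
import Mathlib
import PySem

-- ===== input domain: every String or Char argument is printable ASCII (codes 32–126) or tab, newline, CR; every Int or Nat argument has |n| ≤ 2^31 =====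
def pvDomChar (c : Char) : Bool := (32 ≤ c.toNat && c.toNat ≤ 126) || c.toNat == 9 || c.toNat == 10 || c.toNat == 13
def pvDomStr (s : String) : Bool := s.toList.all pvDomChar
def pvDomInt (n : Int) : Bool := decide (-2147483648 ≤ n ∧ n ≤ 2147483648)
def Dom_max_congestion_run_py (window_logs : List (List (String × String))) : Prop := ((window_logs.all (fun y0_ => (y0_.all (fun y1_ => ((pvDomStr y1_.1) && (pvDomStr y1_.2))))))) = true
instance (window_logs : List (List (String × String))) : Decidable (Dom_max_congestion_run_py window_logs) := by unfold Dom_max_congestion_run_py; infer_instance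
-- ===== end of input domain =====

-- B replaces A's counter-with-reset single pass by explicitly forming the maximal
-- consecutive runs of "Congestion" flags and taking the maximum run length (objective: alternative decomposition).

-- ===== PORT A =====
-- row.get("event_type", "") on the assoc-list dict = first-match lookup with default
def pvGetEvent (row : List (String × String)) : String :=
  (row.lookup "event_type").getD ""

def max_congestion_run_py (window_logs : List (List (String × String))) : Int :=
  let r := window_logs.foldl
    (fun (s : Int × Int) row =>
      if PySem.Str.strip (pvGetEvent row) == "Congestion" then
        let cur := s.2 + 1
        (max s.1 cur, cur)
      else
        (s.1, 0))
    (0, 0)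
  r.1

-- ===== PORT B =====
def pvFlag (row : List (String × String)) : Bool :=
  PySem.Str.strip ((row.lookup "event_type").getD "") == "Congestion"

-- the run-forming while loop of Source B: inner count k = takeWhile length, rest = rest[k:]
def pvRuns : List Bool → List Nat
  | [] => []
  | false :: rest => pvRuns rest
  | true :: rest => (1 + (rest.takeWhile id).length) :: pvRuns (rest.dropWhile id)
termination_by l => l.length
decreasing_by
  · simp
  · have := List.length_dropWhile_le (p := id) (l := rest); simp at *; omega

def max_congestion_run_py_alt (window_logs : List (List (String × String))) : Int :=
  let flags := window_logs.map pvFlag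
  (((pvRuns flags).foldr max 0 : Nat) : Int)

-- ===== PRECONDITION & SPEC =====
def Spec_max_congestion_run_py (window_logs : List (List (String × String))) (out : Int) : Prop := out = max_congestion_run_py_alt window_logs
instance (window_logs : List (List (String × String))) (out : Int) : Decidable (Spec_max_congestion_run_py window_logs out) := by unfold Spec_max_congestion_run_py; infer_instance

-- ===== CLAIM (what is proved, stated in full; the proofs are below) =====
def Claim_equal_max_congestion_run_py : Prop := ∀ (window_logs : List (List (String × String))), Dom_max_congestion_run_py window_logs → Spec_max_congestion_run_py window_logs (max_congestion_run_py window_logs)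

-- ===== LEMMAS AND PROOFS =====

-- A's fold over flags, Nat-valued
def pvFoldA : List Bool → Nat × Nat → Nat × Nat
  | [], s => s
  | f :: l, s => pvFoldA l (if f then (max s.1 (s.2 + 1), s.2 + 1) else (s.1, 0))

-- "best over the rest, with a current run of length c already open"
def pvBestFrom : Nat → List Bool → Nat
  | c, [] => c
  | c, true :: l => pvBestFrom (c + 1) l
  | c, false :: l => max c (pvBestFrom 0 l)

theorem pvBestFrom_ge (l : List Bool) (c : Nat) : c ≤ pvBestFrom c l := by
  induction l generalizing c with
  | nil => simp [pvBestFrom]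
  | cons f l ih =>
    cases f
    · simp [pvBestFrom]
    · simpa [pvBestFrom] using le_trans (Nat.le_succ c) (ih (c + 1))

theorem pvFoldA_spec (l : List Bool) (b c : Nat) (h : c ≤ b) :
    (pvFoldA l (b, c)).1 = max b (pvBestFrom c l) := by
  induction l generalizing b c with
  | nil => simp [pvFoldA, pvBestFrom]; omega
  | cons f l ih =>
    cases f
    · simp only [pvFoldA, Bool.false_eq_true, if_false, pvBestFrom]
      rw [ih b 0 (Nat.zero_le _)]; omega
    · simp only [pvFoldA, if_true, pvBestFrom]
      rw [ih (max b (c + 1)) (c + 1) (le_max_right _ _)]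
      have := pvBestFrom_ge l (c + 1)
      omega

theorem pvBestFrom_run (l : List Bool)
    (main : ∀ l' : List Bool, l'.length < l.length → pvBestFrom 0 l' = (pvRuns l').foldr max 0) :
    ∀ c, pvBestFrom c l = max (c + (l.takeWhile id).length) ((pvRuns (l.dropWhile id)).foldr max 0) := by
  induction l with
  | nil => intro c; simp [pvBestFrom, pvRuns]
  | cons f l ih =>
    intro c
    cases f
    · have hm : pvBestFrom 0 l = (pvRuns l).foldr max 0 :=
        main l (by simp)
      simp [pvBestFrom, List.takeWhile, List.dropWhile, pvRuns, hm]
    · have ih' := ih (fun l' hl => main l' (Nat.lt_succ_of_lt hl)) (c + 1)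
      simp only [pvBestFrom]
      rw [ih']
      simp [List.takeWhile, List.dropWhile]
      omega

theorem pvBestFrom_eq_runs : ∀ (l : List Bool), pvBestFrom 0 l = (pvRuns l).foldr max 0
  | [] => by simp [pvBestFrom, pvRuns]
  | false :: rest => by
      simp [pvBestFrom, pvRuns, pvBestFrom_eq_runs rest]
  | true :: rest => by
      have h := pvBestFrom_run rest
        (fun l' hl => pvBestFrom_eq_runs l') 1
      simp only [pvBestFrom, pvRuns, h, List.foldr]
termination_by l => l.length
decreasing_by
  all_goals (simp_all; try omega)

-- Int fold of A equals the Nat fold, cast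
theorem pvFoldA_int (l : List Bool) (b c : Nat) :
    l.foldl (fun (s : Int × Int) f =>
        if f then (max s.1 (s.2 + 1), s.2 + 1) else (s.1, 0)) ((b : Int), (c : Int))
      = (((pvFoldA l (b, c)).1 : Int), ((pvFoldA l (b, c)).2 : Int)) := by
  induction l generalizing b c with
  | nil => simp [pvFoldA]
  | cons f l ih =>
    cases f
    · simpa [pvFoldA] using ih b 0
    · have h := ih (max b (c + 1)) (c + 1)
      simp only [List.foldl, if_true, pvFoldA]
      rw [← h]
      push_cast
      ring_nf

-- ===== VERDICT (by name: the statement is the Claim_ definition above) =====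
theorem max_congestion_run_py_spec : Claim_equal_max_congestion_run_py := by
  intro wl _
  unfold Spec_max_congestion_run_py
  have h1 : max_congestion_run_py wl
      = ((wl.map pvFlag).foldl (fun (s : Int × Int) f =>
          if f then (max s.1 (s.2 + 1), s.2 + 1) else (s.1, 0)) ((0 : Int), (0 : Int))).1 := by
    unfold max_congestion_run_py pvGetEvent pvFlag
    rw [List.foldl_map]
  rw [h1]
  rw [show ((0 : Int), (0 : Int)) = (((0 : Nat) : Int), ((0 : Nat) : Int)) by simp]
  rw [pvFoldA_int (wl.map pvFlag) 0 0]
  unfold max_congestion_run_py_alt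
  rw [pvFoldA_spec _ 0 0 le_rfl, pvBestFrom_eq_runs]
  simp
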